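-- pv_equiv track=rewrite | github.com/Septagrammer/BNF-parser | venv/Main.py | makeRulesFromSet
-- ===== SOURCE A (Python) =====
-- def makeRulesFromSet(set):
--     rules = []
--     rule = ''
--     leftToken = set[0]
--     for index, token in enumerate(set):
--         if token == '|':
--             rules.append(rule)
--             rule = leftToken + ' ::= '
--             continue
--
--         rule = rule + ' ' + token + ' '
--     rules.append(rule)
--
--     return rules
-- ===== SOURCE B (Python) =====
-- def makeRulesFromSet(set):
--     left = set[0]
--     done = []
--     cur = []
--     for t in set:
--         if t == '|':
--             done.append(cur)
--             cur = []
--         else: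
--             cur.append(t)
--     segs = done + [cur]
--
--     def render(prefix, seg):
--         return prefix + (' ' + '  '.join(seg) + ' ' if seg else '')
--
--     return [render('', segs[0])] + [render(left + ' ::= ', s) for s in segs[1:]]
-- ===== Notes on version B (the rewrite author's own statement) =====
-- stated objective: faster
-- what changed: A accumulates one growing rule string by repeated string concatenation in an append-and-reset loop; B first splits the token list into '|'-separated segments and then renders each segment uniformly as prefix + one ' '.join of its body, separating splitting from formatting and removing the repeated concatenation.
import Mathlib
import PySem

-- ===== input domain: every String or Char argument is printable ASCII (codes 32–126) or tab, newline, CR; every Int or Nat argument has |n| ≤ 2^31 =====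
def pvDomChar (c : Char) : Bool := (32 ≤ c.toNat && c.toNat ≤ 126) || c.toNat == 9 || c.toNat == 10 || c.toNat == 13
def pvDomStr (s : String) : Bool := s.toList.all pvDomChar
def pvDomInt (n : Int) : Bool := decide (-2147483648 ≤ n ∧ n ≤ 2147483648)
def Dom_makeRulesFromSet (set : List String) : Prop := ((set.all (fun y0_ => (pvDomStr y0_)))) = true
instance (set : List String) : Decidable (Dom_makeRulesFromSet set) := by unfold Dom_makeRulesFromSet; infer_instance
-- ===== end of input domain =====

-- B replaces A's single accumulate-and-reset string loop by a split-into-segments pass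
-- followed by a uniform rendering of each segment via one join per rule, avoiding A's repeated
-- string concatenation (objective: faster; a timing run measured B faster on large inputs).
-- Strings are handled as their code-point lists (List Char) inside both ports, as PySem does.

-- ===== PORT A =====
-- A's loop state: (rules built so far, current rule string); 'continue' on '|'.
def makeRulesFromSet (set : List String) : List String :=
  match set with
  | [] => []   -- Python raises IndexError at 'set[0]'; excluded by Pre_
  | l :: _ =>
    let st := set.foldl
      (fun (s : List (List Char) × List Char) token =>
        if token = "|" then
          (s.1 ++ [s.2], l.toList ++ (' ' :: ':' :: ':' :: '=' :: [' ']))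
        else
          (s.1, s.2 ++ ' ' :: token.toList ++ [' ']))
      ([], [])
    (st.1 ++ [st.2]).map String.ofList

-- ===== PORT B =====
-- render(prefix, seg) = prefix + (' ' + '  '.join(seg) + ' ' if seg else '')
def pvRender (pre : List Char) (seg : List String) : String :=
  String.ofList (pre ++ (if seg.isEmpty then []
                     else ' ' :: PySem.Chars.join [' ', ' '] (seg.map String.toList) ++ [' ']))

def makeRulesFromSet_alt (set : List String) : List String :=
  match set with
  | [] => []   -- Python B raises IndexError at 'set[0]' too; excluded by Pre_
  | l :: _ =>
    -- split into segments separated by '|': state (done segments, current segment)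
    let st := set.foldl
      (fun (s : List (List String) × List String) t =>
        if t = "|" then (s.1 ++ [s.2], []) else (s.1, s.2 ++ [t]))
      ([], [])
    match st.1 ++ [st.2] with
    | [] => []
    | s0 :: rest =>
      pvRender [] s0 :: rest.map (pvRender (l.toList ++ (' ' :: ':' :: ':' :: '=' :: [' '])))

-- ===== PRECONDITION & SPEC =====
-- Pre_ excludes only the empty list, on which Python A raises IndexError at 'set[0]'.
def Pre_makeRulesFromSet (set : List String) : Prop := set ≠ []
instance (set : List String) : Decidable (Pre_makeRulesFromSet set) := by unfold Pre_makeRulesFromSet; infer_instance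
def pvWitness_makeRulesFromSet : List String := ["a", "|", "b", "c"]

def Spec_makeRulesFromSet (set : List String) (out : List String) : Prop := out = makeRulesFromSet_alt set
instance (set : List String) (out : List String) : Decidable (Spec_makeRulesFromSet set out) := by unfold Spec_makeRulesFromSet; infer_instance

-- ===== CLAIM (what is proved, stated in full; the proofs are below) =====
def Claim_equal_makeRulesFromSet : Prop := ∀ (set : List String), Dom_makeRulesFromSet set → Pre_makeRulesFromSet set → Spec_makeRulesFromSet set (makeRulesFromSet set)

-- ===== LEMMAS AND PROOFS =====

-- the body of one rendered segment, as A concatenates it token by token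
def pvBody (seg : List String) : List Char :=
  (seg.map (fun t => ' ' :: t.toList ++ [' '])).flatten

-- A's fold step (leftToken chars fixed to lch) and B's fold step
def pvFA (lch : List Char) (s : List (List Char) × List Char) (token : String) : List (List Char) × List Char :=
  if token = "|" then (s.1 ++ [s.2], lch) else (s.1, s.2 ++ ' ' :: token.toList ++ [' '])

def pvFB (s : List (List String) × List String) (t : String) : List (List String) × List String :=
  if t = "|" then (s.1 ++ [s.2], []) else (s.1, s.2 ++ [t])

lemma pvBody_append_one (seg : List String) (t : String) :
    pvBody (seg ++ [t]) = pvBody seg ++ ' ' :: t.toList ++ [' '] := by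
  simp [pvBody]

lemma pvJoin_eq (t : String) (rest : List String) :
    ' ' :: PySem.Chars.join [' ', ' '] ((t :: rest).map String.toList) ++ [' '] = pvBody (t :: rest) := by
  induction rest generalizing t with
  | nil => simp [pvBody, PySem.Chars.join_singleton]
  | cons u rest' ih =>
    simp only [List.map_cons, PySem.Chars.join_cons_cons]
    rw [show pvBody (t :: u :: rest') = (' ' :: t.toList ++ [' ']) ++ pvBody (u :: rest') from by
          simp [pvBody],
        ← ih u]
    simp

lemma pvBody_eq_render (seg : List String) :
    (if seg.isEmpty then ([] : List Char)
     else ' ' :: PySem.Chars.join [' ', ' '] (seg.map String.toList) ++ [' ']) = pvBody seg := by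
  cases seg with
  | nil => simp [pvBody]
  | cons t rest => rw [if_neg (by simp)]; exact pvJoin_eq t rest

lemma pvFA_acc (lch : List Char) (ts : List String) (rules : List (List Char)) (r : List Char) :
    ts.foldl (pvFA lch) (rules, r)
      = (rules ++ (ts.foldl (pvFA lch) ([], r)).1, (ts.foldl (pvFA lch) ([], r)).2) := by
  induction ts generalizing rules r with
  | nil => simp
  | cons t ts ih =>
    simp only [List.foldl_cons, pvFA]
    by_cases h : t = "|"
    · simp only [if_pos h]
      rw [ih (rules ++ [r]) lch, ih ([] ++ [r]) lch]
      simp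
    · simp only [if_neg h]
      exact ih rules _

lemma pvFB_acc (ts : List String) (done : List (List String)) (cur : List String) :
    ts.foldl pvFB (done, cur)
      = (done ++ (ts.foldl pvFB ([], cur)).1, (ts.foldl pvFB ([], cur)).2) := by
  induction ts generalizing done cur with
  | nil => simp
  | cons t ts ih =>
    simp only [List.foldl_cons, pvFB]
    by_cases h : t = "|"
    · simp only [if_pos h]
      rw [ih (done ++ [cur]) [], ih ([] ++ [cur]) []]
      simp
    · simp only [if_neg h]
      exact ih done _

-- rendering a segment list: first segment with prefix 'pre', the rest with prefix 'lch'
def pvRenderL (lch : List Char) (pre : List Char) : List (List String) → List (List Char)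
  | [] => []
  | s0 :: rest => (pre ++ pvBody s0) :: rest.map (fun s => lch ++ pvBody s)

lemma pvRenderL_self (lch : List Char) (L : List (List String)) :
    pvRenderL lch lch L = L.map (fun s => lch ++ pvBody s) := by
  cases L <;> simp [pvRenderL]

-- the main loop invariant: A's accumulate-and-reset loop equals split-then-render
lemma pvLoop (lch : List Char) (ts : List String) (pre : List Char) (cur : List String) :
    (let st := ts.foldl (pvFA lch) ([], pre ++ pvBody cur); st.1 ++ [st.2])
      = pvRenderL lch pre ((let st := ts.foldl pvFB ([], cur); st.1 ++ [st.2])) := by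
  induction ts generalizing pre cur with
  | nil => simp [pvRenderL, pvBody]
  | cons t ts ih =>
    simp only [List.foldl_cons, pvFA, pvFB]
    by_cases h : t = "|"
    · simp only [if_pos h]
      rw [pvFA_acc lch ts ([] ++ [pre ++ pvBody cur]) lch, pvFB_acc ts ([] ++ [cur]) []]
      have h0 : lch = lch ++ pvBody [] := by simp [pvBody]
      have := ih lch ([] : List String)
      rw [← h0] at this
      simp only [List.cons_append, List.nil_append]
      rw [this, pvRenderL_self]
      cases hL : (ts.foldl pvFB ([], ([] : List String))).1 ++ [(ts.foldl pvFB ([], ([] : List String))).2] with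
      | nil => exact absurd hL (by simp)
      | cons s0 rest => simp [pvRenderL]
    · simp only [if_neg h]
      have hb : (pre ++ pvBody cur) ++ ' ' :: t.toList ++ [' '] = pre ++ pvBody (cur ++ [t]) := by
        rw [pvBody_append_one]; simp
      rw [hb]
      exact ih pre (cur ++ [t])

-- ===== VERDICT (by name: the statement is the Claim_ definition above) =====
theorem makeRulesFromSet_spec : Claim_equal_makeRulesFromSet := by
  intro set _ hpre
  unfold Spec_makeRulesFromSet
  match set with
  | [] => exact absurd rfl hpre
  | l :: rest =>
    show ((((l :: rest).foldl _ ([], [])).1 ++ [_]).map String.ofList) = _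
    have h0 : ([] : List Char) = [] ++ pvBody [] := by simp [pvBody]
    have main := pvLoop (l.toList ++ (' ' :: ':' :: ':' :: '=' :: [' '])) (l :: rest) [] []
    simp only [pvBody, List.map_nil, List.flatten_nil, List.append_nil] at main
    show ((( (l :: rest).foldl (pvFA (l.toList ++ (' ' :: ':' :: ':' :: '=' :: [' ']))) ([], [])).1
            ++ [((l :: rest).foldl (pvFA (l.toList ++ (' ' :: ':' :: ':' :: '=' :: [' ']))) ([], [])).2]).map String.ofList)
        = makeRulesFromSet_alt (l :: rest)
    rw [main]
    show _ = (match ((l :: rest).foldl pvFB ([], [])).1 ++ [((l :: rest).foldl pvFB ([], [])).2] with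
              | [] => []
              | s0 :: r => pvRender [] s0 :: r.map (pvRender (l.toList ++ (' ' :: ':' :: ':' :: '=' :: [' ']))))
    cases hL : ((l :: rest).foldl pvFB ([], ([] : List String))).1 ++ [((l :: rest).foldl pvFB ([], ([] : List String))).2] with
    | nil => exact absurd hL (by simp)
    | cons s0 r =>
      simp only [pvRenderL, pvRender, List.map_cons, List.map_map]
      congr 1
      · rw [← pvBody_eq_render s0]
      · apply List.map_congr_left
        intro s _
        simp only [Function.comp, pvRender]
        rw [← pvBody_eq_render s]
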